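-- pv_equiv track=rewrite | github.com/MartNotermans/Advanced-Technical-Programming | interpet.py | checkIfTag
-- ===== SOURCE A (Python) =====
-- from typing import Tuple
--
-- validTagChars = 'abcdefghijklmnopqrstuvwxyz0123456789'
--
-- def checkIfTag(file : str, index) -> Tuple[bool, str, bool, int]:
--     isOpenTag = True
--     #check if first char is opening bracket
--     if file[index] != '<':
--         #geen tag
--         return (False, "", isOpenTag, 0)
--     index+=1
--
--
--     #+1 is na de <
--     #om de closing tag te vinden
--     if file[index] == '/':
--         isOpenTag = False
--         index+=1
--
--     if not file[index] in validTagChars: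
--         #geen tag, check if <>
--         return(False, "", isOpenTag, 0)
--
--     #index+1 opdat eerste char al gecheckt is
--     for i in range (index+1, len(file) ):
--         if file[i] == '>':
--             #i+1 omdat je het eerste char na de tag returnt
--             return (True, file[index: i], isOpenTag, i+1)
--         elif not file[i] in validTagChars:
--             return(False, "", isOpenTag, 0)
--
--     #syntax error
--     return (False, "", isOpenTag, 0)
-- ===== SOURCE B (Python) =====
-- from typing import Tuple
--
-- validTagChars = 'abcdefghijklmnopqrstuvwxyz0123456789'
--
-- def checkIfTag(file : str, index) -> Tuple[bool, str, bool, int]: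
--     isOpenTag = True
--     #check if first char is opening bracket
--     if file[index] != '<':
--         return (False, "", isOpenTag, 0)
--     index += 1
--
--     if file[index] == '/':
--         isOpenTag = False
--         index += 1
--
--     if not file[index] in validTagChars:
--         return (False, "", isOpenTag, 0)
--
--     # two-pass: locate the first '>' after the (already checked) first name char,
--     # then validate the whole candidate body at once
--     j = file.find('>', index + 1)
--     if j == -1:
--         return (False, "", isOpenTag, 0)
--     if all(c in validTagChars for c in file[index + 1 : j]):
--         return (True, file[index:j], isOpenTag, j + 1)
--     return (False, "", isOpenTag, 0)
-- ===== Notes on version B (the rewrite author's own statement) =====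
-- stated objective: alternative
-- what changed: Replaces the character-by-character scanning loop with a two-pass tail: str.find locates the first '>' after the tag name's first character and a single all() pass validates the candidate body, returning the slice directly.
-- outside the precondition, e.g. on checkIfTag('<a>', -3): A returns (True, 'a', True, 0), B returns (True, 'a', True, 3)
import Mathlib
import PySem

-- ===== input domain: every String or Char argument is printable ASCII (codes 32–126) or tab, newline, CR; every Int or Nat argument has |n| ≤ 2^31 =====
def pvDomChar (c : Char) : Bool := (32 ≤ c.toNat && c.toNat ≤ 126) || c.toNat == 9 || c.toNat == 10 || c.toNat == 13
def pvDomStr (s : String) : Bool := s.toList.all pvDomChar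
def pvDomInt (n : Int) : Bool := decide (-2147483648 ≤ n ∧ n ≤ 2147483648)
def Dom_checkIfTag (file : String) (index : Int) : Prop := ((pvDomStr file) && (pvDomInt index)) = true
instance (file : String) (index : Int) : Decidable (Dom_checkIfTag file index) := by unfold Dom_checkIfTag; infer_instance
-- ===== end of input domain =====

-- B replaces A's char-by-char scan loop with find('>') + one validation pass over the slice;
-- equivalence is claimed on nonnegative indices where the prologue's reads are in range (see Pre_).

-- ===== PORT A =====
def pvValidTagChars : List Char := "abcdefghijklmnopqrstuvwxyz0123456789".toList

-- the 'for i in range(index+1, len(file))' loop of A, with its two early returns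
def pvScanA (file : List Char) (tagStart : Int) (isOpenTag : Bool) : List Int → Bool × String × Bool × Int
  | [] => (false, "", isOpenTag, 0)
  | i :: rest =>
    let c := PySem.List.pyGetD file i ' '   -- i ∈ range(_, len file): always in range
    if c = '>' then
      (true, String.ofList (PySem.List.slice file (some tagStart) (some i)), isOpenTag, i + 1)
    else if ¬ pvValidTagChars.contains c then
      (false, "", isOpenTag, 0)
    else
      pvScanA file tagStart isOpenTag rest

def checkIfTag (file : String) (index : Int) : Bool × String × Bool × Int :=
  let isOpenTag := true
  match PySem.Str.pyGet? file index with
  | none => (false, "", isOpenTag, 0)      -- Python raises IndexError here; excluded by Pre_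
  | some c0 =>
    if c0 ≠ '<' then (false, "", isOpenTag, 0)
    else
      let index := index + 1
      match PySem.Str.pyGet? file index with
      | none => (false, "", isOpenTag, 0)  -- IndexError; excluded by Pre_
      | some c1 =>
        let st := if c1 = '/' then (false, index + 1) else (isOpenTag, index)
        let isOpenTag := st.1
        let index := st.2
        match PySem.Str.pyGet? file index with
        | none => (false, "", isOpenTag, 0)  -- IndexError; excluded by Pre_
        | some c2 =>
          if ¬ pvValidTagChars.contains c2 then (false, "", isOpenTag, 0)
          else
            pvScanA file.toList index isOpenTag
              (PySem.List.pyRange (index + 1) (PySem.Str.len file) 1)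

-- ===== PORT B =====
def checkIfTag_alt (file : String) (index : Int) : Bool × String × Bool × Int :=
  let isOpenTag := true
  match PySem.Str.pyGet? file index with
  | none => (false, "", isOpenTag, 0)      -- IndexError; excluded by Pre_
  | some c0 =>
    if c0 ≠ '<' then (false, "", isOpenTag, 0)
    else
      let index := index + 1
      match PySem.Str.pyGet? file index with
      | none => (false, "", isOpenTag, 0)  -- IndexError; excluded by Pre_
      | some c1 =>
        let st := if c1 = '/' then (false, index + 1) else (isOpenTag, index)
        let isOpenTag := st.1
        let index := st.2
        match PySem.Str.pyGet? file index with
        | none => (false, "", isOpenTag, 0)  -- IndexError; excluded by Pre_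
        | some c2 =>
          if ¬ pvValidTagChars.contains c2 then (false, "", isOpenTag, 0)
          else
            let j := PySem.Str.findFrom file ">" (index + 1) none
            if j = -1 then (false, "", isOpenTag, 0)
            else if (PySem.List.slice file.toList (some (index + 1)) (some j)).all
                      (fun c => pvValidTagChars.contains c) then
              (true, String.ofList (PySem.List.slice file.toList (some index) (some j)), isOpenTag, j + 1)
            else (false, "", isOpenTag, 0)

-- ===== PRECONDITION & SPEC =====
-- Pre_ excludes the inputs where the prologue's reads file[index]/file[index+1] raise IndexError,
-- and the negative in-range indices that hit a '<': there A's values arise from Python's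
-- per-access negative-index wraparound inside the scan loop and slice (outside the parser's
-- natural domain of positions); negative indices that do not hit a '<' stay inside Pre_.
def Pre_checkIfTag (file : String) (index : Int) : Prop :=
  (0 ≤ index ∧ index.toNat < file.toList.length ∧
   (file.toList.getD index.toNat ' ' = '<' →
     (index.toNat + 1 < file.toList.length ∧
      (file.toList.getD (index.toNat + 1) ' ' = '/' → index.toNat + 2 < file.toList.length)))) ∨
  (index < 0 ∧ 0 ≤ index + file.toList.length ∧
   file.toList.getD (index + file.toList.length).toNat ' ' ≠ '<')
instance (file : String) (index : Int) : Decidable (Pre_checkIfTag file index) := by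
  unfold Pre_checkIfTag; infer_instance

def pvWitness_checkIfTag : String × Int := ("<ab>", 0)

def Spec_checkIfTag (file : String) (index : Int) (out : Bool × String × Bool × Int) : Prop := out = checkIfTag_alt file index
instance (file : String) (index : Int) (out : Bool × String × Bool × Int) : Decidable (Spec_checkIfTag file index out) := by unfold Spec_checkIfTag; infer_instance

-- ===== CLAIM (what is proved, stated in full; the proofs are below) =====
def Claim_equal_checkIfTag : Prop := ∀ (file : String) (index : Int), Dom_checkIfTag file index → Pre_checkIfTag file index → Spec_checkIfTag file index (checkIfTag file index)

-- ===== LEMMAS AND PROOFS =====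

theorem pv_singleton_prefix (x : Char) (s : List Char) : [x] <+: s ↔ s.head? = some x := by
  cases s with
  | nil => simp
  | cons a t => rw [List.cons_prefix_cons]; simp [eq_comm]

theorem pv_find_singleton_cons (c x : Char) (l : List Char) :
    PySem.Chars.find (c :: l) [x] =
      if c = x then 0
      else if PySem.Chars.find l [x] = -1 then -1 else PySem.Chars.find l [x] + 1 := by
  by_cases hc : c = x
  · subst hc
    have h0 : [c] <+: c :: l := ⟨l, rfl⟩
    have hnn : 0 ≤ PySem.Chars.find (c :: l) [c] :=
      (PySem.Chars.find_nonneg_iff _ _).2 h0.isInfix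
    obtain ⟨hp, hmin⟩ := PySem.Chars.find_spec hnn
    have ht : (PySem.Chars.find (c :: l) [c]).toNat = 0 := by
      by_contra h
      exact (hmin 0 (Nat.pos_of_ne_zero h)) (by simp)
    rw [if_pos rfl]
    omega
  · by_cases hl : PySem.Chars.find l [x] = -1
    · have hni : ¬ [x] <:+: l := (PySem.Chars.find_eq_neg_one_iff _ _).1 hl
      have hni2 : ¬ [x] <:+: (c :: l) := by
        rw [List.singleton_infix_iff] at hni ⊢
        simp only [List.mem_cons, not_or]
        exact ⟨fun h => hc h.symm, hni⟩
      rw [if_neg hc, if_pos hl, (PySem.Chars.find_eq_neg_one_iff _ _).2 hni2]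
    · have hnn : 0 ≤ PySem.Chars.find l [x] := by
        have := PySem.Chars.neg_one_le_find l [x]; omega
      obtain ⟨hp, hmin⟩ := PySem.Chars.find_spec hnn
      have hin : [x] <:+: (c :: l) :=
        List.infix_cons ((PySem.Chars.find_nonneg_iff l [x]).1 hnn)
      have hFnn : 0 ≤ PySem.Chars.find (c :: l) [x] := (PySem.Chars.find_nonneg_iff _ _).2 hin
      obtain ⟨hp', hmin'⟩ := PySem.Chars.find_spec hFnn
      have hFle : (PySem.Chars.find (c :: l) [x]).toNat ≤ (PySem.Chars.find l [x]).toNat + 1 := by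
        by_contra h
        exact (hmin' ((PySem.Chars.find l [x]).toNat + 1) (by omega)) (by simpa using hp)
      have hF0 : (PySem.Chars.find (c :: l) [x]).toNat ≠ 0 := by
        intro h
        rw [h, List.drop_zero, List.cons_prefix_cons] at hp'
        exact hc hp'.1.symm
      have hmle : (PySem.Chars.find l [x]).toNat ≤ (PySem.Chars.find (c :: l) [x]).toNat - 1 := by
        by_contra h
        have hd : (c :: l).drop (PySem.Chars.find (c :: l) [x]).toNat =
            l.drop ((PySem.Chars.find (c :: l) [x]).toNat - 1) := by
          obtain ⟨k, hk⟩ := Nat.exists_eq_succ_of_ne_zero hF0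
          simp [hk]
        exact (hmin ((PySem.Chars.find (c :: l) [x]).toNat - 1) (by omega)) (by rw [← hd]; exact hp')
      rw [if_neg hc, if_neg hl]
      omega

theorem pv_findFrom_len (cs : List Char) :
    PySem.Chars.findFrom cs ['>'] (cs.length : Int) = -1 := by
  rw [PySem.Chars.findFrom_natCast_eq_neg_one_iff cs ['>'] cs.length le_rfl]
  simp

theorem pv_findFrom_step (cs : List Char) (lo : Nat) (h : lo < cs.length) :
    PySem.Chars.findFrom cs ['>'] (lo : Int) =
      if cs[lo]'h = '>' then (lo : Int)
      else PySem.Chars.findFrom cs ['>'] ((lo : Int) + 1) := by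
  have hcast : ((lo : Int) + 1) = ((lo + 1 : Nat) : Int) := by push_cast; ring
  rw [PySem.Chars.findFrom_natCast cs ['>'] lo h.le, hcast,
      PySem.Chars.findFrom_natCast cs ['>'] (lo + 1) h,
      List.drop_eq_getElem_cons h, pv_find_singleton_cons]
  have hnn := PySem.Chars.neg_one_le_find (cs.drop (lo + 1)) ['>']
  split_ifs <;> omega

theorem pv_findFrom_facts (cs : List Char) (lo : Nat) (hle : lo ≤ cs.length)
    (h : PySem.Chars.findFrom cs ['>'] (lo : Int) ≠ -1) :
    (lo : Int) ≤ PySem.Chars.findFrom cs ['>'] (lo : Int) ∧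
    (PySem.Chars.findFrom cs ['>'] (lo : Int)).toNat < cs.length ∧
    cs[(PySem.Chars.findFrom cs ['>'] (lo : Int)).toNat]? = some '>' := by
  obtain ⟨h1, h2, _⟩ := PySem.Chars.findFrom_natCast_spec cs ['>'] lo hle h
  have hd : cs[(PySem.Chars.findFrom cs ['>'] (lo : Int)).toNat]? = some '>' := by
    rw [← List.head?_drop]
    exact (pv_singleton_prefix _ _).1 h2
  obtain ⟨hlt, -⟩ := List.getElem?_eq_some_iff.1 hd
  exact ⟨h1, hlt, hd⟩

theorem pv_scan_eq_find (cs : List Char) (tagStart : Int) (isOpen : Bool) :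
    ∀ (n lo : Nat), lo ≤ cs.length → cs.length - lo = n →
    pvScanA cs tagStart isOpen (PySem.List.pyRange (lo : Int) (cs.length : Int)) =
      (if PySem.Chars.findFrom cs ['>'] (lo : Int) = -1 then (false, "", isOpen, 0)
       else if (PySem.List.slice cs (some (lo : Int))
                  (some (PySem.Chars.findFrom cs ['>'] (lo : Int)))).all
                (fun c => pvValidTagChars.contains c) then
         (true,
          String.ofList (PySem.List.slice cs (some tagStart)
            (some (PySem.Chars.findFrom cs ['>'] (lo : Int)))),
          isOpen, PySem.Chars.findFrom cs ['>'] (lo : Int) + 1)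
       else (false, "", isOpen, 0)) := by
  intro n
  induction n with
  | zero =>
    intro lo hle h0
    have hlo : lo = cs.length := by omega
    subst hlo
    rw [PySem.List.pyRange_one_eq_nil (by omega), pv_findFrom_len]
    simp [pvScanA]
  | succ n ih =>
    intro lo hle hn
    have hlt : lo < cs.length := by omega
    have hcast : ((lo : Int) + 1) = ((lo + 1 : Nat) : Int) := by push_cast; ring
    rw [PySem.List.pyRange_one_cons (by exact_mod_cast hlt)]
    show (let c := PySem.List.pyGetD cs (lo : Int) ' '; _) = _
    simp only [pvScanA]
    have hget : PySem.List.pyGetD cs (lo : Int) ' ' = cs[lo]'hlt := by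
      rw [PySem.List.pyGetD_natCast, List.getD_eq_getElem cs ' ' hlt]
    rw [hget, pv_findFrom_step cs lo hlt]
    by_cases hg : cs[lo]'hlt = '>'
    · rw [if_pos hg, if_pos hg, if_neg (by omega : ¬ ((lo : Int) = -1))]
      have hsl : PySem.List.slice cs (some (lo : Int)) (some (lo : Int)) = ([] : List Char) := by
        rw [PySem.List.slice_natCast]; simp
      rw [hsl]
      simp
    · rw [if_neg hg, if_neg hg]
      by_cases hF : PySem.Chars.findFrom cs ['>'] ((lo : Int) + 1) = -1
      · by_cases hv : pvValidTagChars.contains (cs[lo]'hlt)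
        · rw [if_neg (not_not_intro hv), hcast, ih (lo + 1) (by omega) (by omega), ← hcast, hF]
          simp
        · rw [if_pos hv, hF]
          simp
      · have hfacts := pv_findFrom_facts cs (lo + 1) (by omega) (by rw [← hcast]; exact hF)
        rw [← hcast] at hfacts
        obtain ⟨hj1, hj2, hj3⟩ := hfacts
        have hjnn : 0 ≤ PySem.Chars.findFrom cs ['>'] ((lo : Int) + 1) := by omega
        have hjlo : lo + 1 ≤ (PySem.Chars.findFrom cs ['>'] ((lo : Int) + 1)).toNat := by omega
        have hslice : PySem.List.slice cs (some (lo : Int))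
              (some (PySem.Chars.findFrom cs ['>'] ((lo : Int) + 1))) =
            cs[lo]'hlt :: PySem.List.slice cs (some ((lo : Int) + 1))
              (some (PySem.Chars.findFrom cs ['>'] ((lo : Int) + 1))) := by
          rw [PySem.List.slice_toNat _ (by omega) hjnn, PySem.List.slice_toNat _ (by omega) hjnn]
          have e1 : ((lo : Int)).toNat = lo := Int.toNat_natCast lo
          have e2 : ((lo : Int) + 1).toNat = lo + 1 := by omega
          rw [e1, e2, List.drop_eq_getElem_cons hlt]
          have h1 : (PySem.Chars.findFrom cs ['>'] ((lo : Int) + 1)).toNat - lo =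
              ((PySem.Chars.findFrom cs ['>'] ((lo : Int) + 1)).toNat - (lo + 1)) + 1 := by
            omega
          rw [h1, List.take_succ_cons]
        by_cases hv : pvValidTagChars.contains (cs[lo]'hlt)
        · rw [if_neg (not_not_intro hv), hcast, ih (lo + 1) (by omega) (by omega), ← hcast, if_neg hF,
              hslice]
          have hv' : cs[lo]'hlt ∈ pvValidTagChars := by simpa using hv
          simp [hv', hF]
        · rw [if_pos hv, if_neg hF, hslice, if_neg]
          intro hall
          rw [List.all_cons, Bool.and_eq_true] at hall
          exact hv hall.1

theorem pv_main (file : String) (index : Int) (hpre : Pre_checkIfTag file index) :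
    checkIfTag file index = checkIfTag_alt file index := by
  rcases hpre with hpre | ⟨hneg, hinr, hne⟩
  case inr =>
    -- negative in-range index whose wrapped character is not '<': both return in the prologue
    obtain ⟨k, hkpos, hkle, rfl⟩ : ∃ k : Nat, 0 < k ∧ k ≤ file.toList.length ∧ index = -(k : Int) :=
      ⟨(-index).toNat, by omega, by omega, by omega⟩
    have hk : file.toList.length - k < file.toList.length := by omega
    have hget : PySem.Str.pyGet? file (-(k : Int)) =
        some (file.toList[file.toList.length - k]'hk) := by
      rw [PySem.Str.pyGet?_eq, PySem.Chars.pyGet?_eq_listPyGet?,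
        PySem.List.pyGet?_neg_natCast _ k hkpos hkle, List.getElem?_eq_getElem hk]
    have hne' : file.toList[file.toList.length - k]'hk ≠ '<' := by
      rw [List.getD_eq_getElem _ _ (by omega : (-(k : Int) + file.toList.length).toNat < file.toList.length)] at hne
      intro h
      apply hne
      rw [← h]
      congr 1
      omega
    unfold checkIfTag checkIfTag_alt
    rw [hget]
    simp only [if_pos hne']
  obtain ⟨hnn, hlen, hbr⟩ := hpre
  have hidx : index = (index.toNat : Int) := (Int.toNat_of_nonneg hnn).symm
  set n := index.toNat with hn
  rw [hidx]
  unfold checkIfTag checkIfTag_alt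
  have hget1 : PySem.Str.pyGet? file ((n : Int)) = some (file.toList[n]'hlen) := by
    rw [PySem.Str.pyGet?_natCast, List.getElem?_eq_getElem hlen]
  simp only [hget1]
  by_cases hc : file.toList[n]'hlen = '<'
  case neg => simp [hc]
  case pos =>
    obtain ⟨h2, h3⟩ := hbr (by rw [List.getD_eq_getElem _ _ hlen]; exact hc)
    have hc1 : ((n : Int) + 1) = ((n + 1 : Nat) : Int) := by push_cast; ring
    have hget2 : PySem.Str.pyGet? file ((n : Int) + 1) = some (file.toList[n + 1]'h2) := by
      rw [hc1, PySem.Str.pyGet?_natCast, List.getElem?_eq_getElem h2]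
    simp only [hc, hget2, ne_eq]
    by_cases hsl : file.toList[n + 1]'h2 = '/'
    · have h4 : n + 2 < file.toList.length := h3 (by rw [List.getD_eq_getElem _ _ h2]; exact hsl)
      have hc2 : ((n : Int) + 1 + 1) = ((n + 2 : Nat) : Int) := by push_cast; ring
      have hget3 : PySem.Str.pyGet? file ((n : Int) + 1 + 1) = some (file.toList[n + 2]'h4) := by
        rw [hc2, PySem.Str.pyGet?_natCast, List.getElem?_eq_getElem h4]
      simp only [hsl, reduceIte, hget3]
      by_cases hv : pvValidTagChars.contains (file.toList[n + 2]'h4)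
      · have hc3 : ((n : Int) + 1 + 1 + 1) = ((n + 3 : Nat) : Int) := by push_cast; ring
        simp only [hv, not_true_eq_false, reduceIte,
          PySem.Str.len_eq, PySem.Str.findFrom_eq, hc2]
        have htl : (">" : String).toList = ['>'] := rfl
        rw [htl]
        exact pv_scan_eq_find file.toList ((n + 2 : Nat) : Int) false
          (file.toList.length - (n + 3)) (n + 3) (by omega) rfl
      · have hv' : file.toList[n + 2]'h4 ∉ pvValidTagChars := by simpa using hv
        simp [hv']
    · simp only [if_neg hsl]
      by_cases hv : pvValidTagChars.contains (file.toList[n + 1]'h2)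
      · have hget2' : PySem.Str.pyGet? file ((n + 1 : Nat) : Int) = some (file.toList[n + 1]'h2) := by
          rw [PySem.Str.pyGet?_natCast, List.getElem?_eq_getElem h2]
        have hc2' : (((n + 1 : Nat) : Int) + 1) = ((n + 2 : Nat) : Int) := by push_cast; ring
        simp only [hc1, hget2', hv, not_true_eq_false, reduceIte,
          PySem.Str.len_eq, PySem.Str.findFrom_eq, hc2']
        have htl : (">" : String).toList = ['>'] := rfl
        rw [htl]
        exact pv_scan_eq_find file.toList ((n + 1 : Nat) : Int) true
          (file.toList.length - (n + 2)) (n + 2) (by omega) rfl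
      · have hget2' : PySem.Str.pyGet? file ((n + 1 : Nat) : Int) = some (file.toList[n + 1]'h2) := by
          rw [PySem.Str.pyGet?_natCast, List.getElem?_eq_getElem h2]
        simp only [hc1, hget2']
        rw [if_pos hv, if_pos hv]

-- ===== VERDICT (by name: the statement is the Claim_ definition above) =====
theorem checkIfTag_spec : Claim_equal_checkIfTag := by
  intro file index _hdom hpre
  unfold Spec_checkIfTag
  exact pv_main file index hpre
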